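-- pv_equiv track=rewrite | github.com/pjestin/aoc | 2023/day13/day13.py | get_col_identifiers
-- ===== SOURCE A (Python) =====
-- def get_col_identifiers(pattern: list[list[bool]]) -> list[int]:
--   identifiers: list[int] = []
--
--   for col in range(len(pattern[0])):
--     identifier: int = 0
--
--     for row in range(len(pattern)):
--       identifier |= (1 if pattern[row][col] else 0) << row
--
--     identifiers.append(identifier)
--
--   return identifiers
-- ===== SOURCE B (Python) =====
-- def get_col_identifiers(pattern: list[list[bool]]) -> list[int]:
--   identifiers: list[int] = [0] * len(pattern[0])
--
--   for row, vals in enumerate(pattern):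
--     identifiers = [ident | ((1 if v else 0) << row)
--                    for ident, v in zip(identifiers, vals)]
--
--   return identifiers
-- ===== Notes on version B (the rewrite author's own statement) =====
-- stated objective: alternative
-- what changed: B makes a single row-major pass, carrying a list of per-column accumulators updated row by row via zip, instead of A's column-major nested loops that finish one column's bitmask at a time.
import Mathlib
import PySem

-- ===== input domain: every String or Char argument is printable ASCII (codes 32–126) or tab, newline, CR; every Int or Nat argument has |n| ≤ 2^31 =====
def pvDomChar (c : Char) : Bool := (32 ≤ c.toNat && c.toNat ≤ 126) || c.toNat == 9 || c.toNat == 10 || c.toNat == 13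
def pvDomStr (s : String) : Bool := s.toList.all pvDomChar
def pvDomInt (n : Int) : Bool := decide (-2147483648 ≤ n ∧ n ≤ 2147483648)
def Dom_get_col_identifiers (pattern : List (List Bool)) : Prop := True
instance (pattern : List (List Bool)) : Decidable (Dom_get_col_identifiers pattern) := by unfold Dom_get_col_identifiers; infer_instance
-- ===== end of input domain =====

-- B replaces A's column-major nested loops by a single row-major pass carrying per-column
-- accumulators (objective: alternative decomposition; same asymptotic cost).

-- ===== PORT A =====
-- A's pattern[0], pattern[row], pattern[row][col] are indexings that can raise; ported with
-- PySem.List.pyGetD, exact on Pre_ (nonempty pattern, no row shorter than row 0).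
-- Python's '|' is PySem.Int.bor; the shift count 'row' comes from range(...) so it is
-- nonnegative and '.toNat' on it is exact.
def get_col_identifiers (pattern : List (List Bool)) : List Int :=
  (PySem.List.pyRange 0 ((PySem.List.pyGetD pattern 0 []).length : Int) 1).foldl
    (fun ids col =>
      ids ++ [(PySem.List.pyRange 0 (pattern.length : Int) 1).foldl
        (fun ident row =>
          PySem.Int.bor ident
            ((if PySem.List.pyGetD (PySem.List.pyGetD pattern row []) col false
              then (1 : Int) else 0) <<< row.toNat))
        0])
    []

-- ===== PORT B =====
-- zip(identifiers, vals) is List.zipWith (truncating, like Python's zip); enumerate is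
-- PySem.List.enumerate; 'row' from enumerate is nonnegative, so '.toNat' on it is exact.
def get_col_identifiers_alt (pattern : List (List Bool)) : List Int :=
  (PySem.List.enumerate pattern 0).foldl
    (fun ids rv =>
      List.zipWith
        (fun ident v => PySem.Int.bor ident ((if v then (1 : Int) else 0) <<< rv.1.toNat))
        ids rv.2)
    (List.replicate (PySem.List.pyGetD pattern 0 []).length 0)

-- ===== PRECONDITION & SPEC =====
-- Pre_ excludes exactly the inputs where the Python A raises IndexError: the empty pattern
-- (pattern[0]) and ragged patterns with some row shorter than row 0 (pattern[row][col]).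
def Pre_get_col_identifiers (pattern : List (List Bool)) : Prop :=
  pattern ≠ [] ∧ ∀ row ∈ pattern, (pattern.headD []).length ≤ row.length
instance (pattern : List (List Bool)) : Decidable (Pre_get_col_identifiers pattern) := by
  unfold Pre_get_col_identifiers; infer_instance
def pvWitness_get_col_identifiers : List (List Bool) :=
  [[true, false, true], [false, false, true]]
def Spec_get_col_identifiers (pattern : List (List Bool)) (out : List Int) : Prop := out = get_col_identifiers_alt pattern
instance (pattern : List (List Bool)) (out : List Int) : Decidable (Spec_get_col_identifiers pattern out) := by unfold Spec_get_col_identifiers; infer_instance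

-- ===== CLAIM (what is proved, stated in full; the proofs are below) =====
def Claim_equal_get_col_identifiers : Prop := ∀ (pattern : List (List Bool)), Dom_get_col_identifiers pattern → Pre_get_col_identifiers pattern → Spec_get_col_identifiers pattern (get_col_identifiers pattern)

-- ===== LEMMAS AND PROOFS =====

-- The bitmask column c accumulates over the rows `rows`, starting at bit position r (in Nat).
def maskFrom (rows : List (List Bool)) (r c : Nat) : Nat :=
  match rows with
  | [] => 0
  | v :: rest => ((if v.getD c false then 1 else 0) <<< r) ||| maskFrom rest (r + 1) c

-- the 0/1 bit both ports shift is the cast of the corresponding Nat bit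
lemma bit_cast (b : Bool) (k : Nat) :
    (if b then (1 : Int) else 0) <<< k = (((if b then 1 else 0) <<< k : Nat) : Int) := by
  cases b <;> simp [Int.zero_shiftLeft, Int.natCast_shiftLeft]

lemma A_inner (rows : List (List Bool)) (c : Nat) : ∀ (sh : Nat) (acc : Nat),
    (List.range rows.length).foldl
      (fun id i => PySem.Int.bor id
        ((if (rows.getD i []).getD c false then (1 : Int) else 0) <<< (i + sh)))
      (acc : Int)
    = ((acc ||| maskFrom rows sh c : Nat) : Int) := by
  induction rows with
  | nil => intro sh acc; simp [maskFrom]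
  | cons v rest ih =>
      intro sh acc
      rw [show (v :: rest).length = rest.length + 1 from rfl, List.range_succ_eq_map,
        List.foldl_cons, List.foldl_map]
      have hstep : PySem.Int.bor (acc : Int)
          ((if ((v :: rest).getD 0 []).getD c false then (1 : Int) else 0) <<< (0 + sh))
          = ((acc ||| ((if v.getD c false then 1 else 0) <<< sh) : Nat) : Int) := by
        simp only [List.getD_cons_zero, Nat.zero_add, bit_cast, PySem.Int.bor_natCast]
      have hfun : (fun (id : Int) (i : ℕ) => PySem.Int.bor id
            ((if ((v :: rest).getD i.succ []).getD c false then (1 : Int) else 0)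
              <<< (i.succ + sh)))
          = (fun (id : Int) (i : ℕ) => PySem.Int.bor id
            ((if (rest.getD i []).getD c false then (1 : Int) else 0) <<< (i + (sh + 1)))) := by
        funext id i
        have : i.succ + sh = i + (sh + 1) := by omega
        simp [this]
      rw [hstep, hfun, ih (sh + 1), maskFrom, Nat.or_assoc]

lemma zip_step (w : Nat) (g : Nat → Int) (v : List Bool) (f : Int → Bool → Int)
    (h : w ≤ v.length) :
    List.zipWith f ((List.range w).map g) v
      = (List.range w).map (fun c => f (g c) (v.getD c false)) := by
  apply List.ext_getElem
  · simp; omega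
  · intro i h1 h2
    have hi : i < w := by simpa using h2
    have hiv : i < v.length := lt_of_lt_of_le hi h
    simp [List.getElem_zipWith, List.getD, List.getElem?_eq_getElem hiv]

lemma B_loop (rows : List (List Bool)) (w : Nat) (hw : ∀ v ∈ rows, w ≤ v.length) :
    ∀ (r : Int), 0 ≤ r → ∀ (g : Nat → Nat),
    (PySem.List.enumerate rows r).foldl
      (fun ids rv =>
        List.zipWith
          (fun ident v => PySem.Int.bor ident ((if v then (1 : Int) else 0) <<< rv.1.toNat))
          ids rv.2)
      ((List.range w).map (fun c => ((g c : Nat) : Int)))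
    = (List.range w).map (fun c => ((g c ||| maskFrom rows r.toNat c : Nat) : Int)) := by
  induction rows with
  | nil =>
      intro r _ g
      simp [PySem.List.enumerate_nil, maskFrom]
  | cons v rest ih =>
      intro r hr g
      rw [PySem.List.enumerate_cons, List.foldl_cons,
        zip_step w _ v _ (hw v (by simp))]
      have hmid : ((List.range w).map
            (fun c => PySem.Int.bor ((g c : Nat) : Int)
              ((if v.getD c false then (1 : Int) else 0) <<< r.toNat)))
          = (List.range w).map
            (fun c => (((g c ||| ((if v.getD c false then 1 else 0) <<< r.toNat) : Nat) : Int))) := by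
        apply List.map_congr_left
        intro c _
        simp only [bit_cast, PySem.Int.bor_natCast]
      rw [hmid, ih (fun u hu => hw u (by simp [hu])) (r + 1) (by omega)]
      apply List.map_congr_left
      intro c _
      have h1 : (r + 1).toNat = r.toNat + 1 := by omega
      rw [h1, maskFrom, Nat.or_assoc]

lemma replicate_as_map (w : Nat) :
    (List.replicate w (0 : Int)) = (List.range w).map (fun c => (((fun _ => 0) c : Nat) : Int)) := by
  rw [List.map_const', List.length_range, Nat.cast_zero]

-- ===== VERDICT (by name: the statement is the Claim_ definition above) =====
theorem get_col_identifiers_spec : Claim_equal_get_col_identifiers := by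
  intro pattern _ hpre
  obtain ⟨hne, hlen⟩ := hpre
  unfold Spec_get_col_identifiers get_col_identifiers get_col_identifiers_alt
  obtain ⟨p, rest, rfl⟩ : ∃ p rest, pattern = p :: rest :=
    match pattern, hne with | p :: rest, _ => ⟨p, rest, rfl⟩
  have hhead : PySem.List.pyGetD (p :: rest) (0 : Int) [] = p := PySem.List.pyGetD_zero_cons ..
  rw [hhead, replicate_as_map,
    B_loop (p :: rest) p.length (by simpa using hlen) 0 le_rfl (fun _ => 0)]
  -- reduce the A side
  rw [show ((p.length : Int)) = ((p.length : Int) - 0) by ring]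
  rw [PySem.List.pyRange_one 0 ((p.length : Int) - 0),
    PySem.List.foldl_append_singleton_eq_map, List.nil_append, List.map_map]
  rw [show (((p :: rest).length : Int)) = (((p :: rest).length : Int) - 0) by ring,
    PySem.List.pyRange_one 0 (((p :: rest).length : Int) - 0)]
  simp only [Int.sub_zero, Int.toNat_natCast]
  apply List.map_congr_left
  intro c _
  simp only [Function.comp, List.foldl_map]
  have hfun : (fun (ident : Int) (k : ℕ) => PySem.Int.bor ident
        ((if PySem.List.pyGetD (PySem.List.pyGetD (p :: rest) ((0 : Int) + (k : Int)) [])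
            ((0 : Int) + (c : Int)) false then (1 : Int) else 0) <<< ((0 : Int) + (k : Int)).toNat))
      = (fun (ident : Int) (k : ℕ) => PySem.Int.bor ident
        ((if ((p :: rest).getD k []).getD c false then (1 : Int) else 0) <<< (k + 0))) := by
    funext ident k
    simp [PySem.List.pyGetD_natCast]
  have hA := A_inner (p :: rest) c 0 0
  rw [Nat.cast_zero] at hA
  rw [hfun, hA]
  norm_num
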